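-- pv_equiv track=rewrite | github.com/Michael-huo/ExpHub | scripts/_segment/policies/semantic_guarded_v1.py | _nearest_uniform_target
-- ===== SOURCE A (Python) =====
-- def _nearest_uniform_target(frame_idx, item_map, attach_radius):
--     best = None
--     best_dist = None
--     for existing_idx in sorted(item_map.keys()):
--         item = item_map[int(existing_idx)]
--         if str(item.get("source_type")) != "uniform":
--             continue
--         dist = abs(int(frame_idx) - int(existing_idx))
--         if dist > int(attach_radius):
--             continue
--         if best is None or dist < best_dist:
--             best = int(existing_idx)
--             best_dist = int(dist)
--     return best
-- ===== SOURCE B (Python) =====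
-- def _nearest_uniform_target(frame_idx, item_map, attach_radius):
--     # Two-sided neighbor search (no sort): instead of tracking a minimum distance, find the
--     # greatest uniform key <= frame_idx and the least uniform key > frame_idx,
--     # then pick between these two candidates (left wins ties: smaller index).
--     fi = int(frame_idx)
--     r = int(attach_radius)
--     left = None   # max uniform key <= fi
--     right = None  # min uniform key > fi
--     for idx, item in item_map.items():
--         if str(item.get("source_type")) != "uniform":
--             continue
--         k = int(idx)
--         if k <= fi:
--             if left is None or k > left:
--                 left = k
--         else:
--             if right is None or k < right:
--                 right = k
--     ld = None if left is None else fi - left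
--     rd = None if right is None else right - fi
--     if ld is not None and ld <= r and (rd is None or ld <= rd or rd > r):
--         return left
--     if rd is not None and rd <= r:
--         return right
--     return None
-- ===== Notes on version B (the rewrite author's own statement) =====
-- stated objective: alternative
-- what changed: B drops A's sort-then-min-distance scan entirely: one unsorted pass computes only the two possible candidates (greatest uniform key <= frame_idx, least uniform key > frame_idx), and a final two-candidate comparison against the radius picks the answer (left candidate wins ties, i.e. the smaller index).
import Mathlib
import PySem

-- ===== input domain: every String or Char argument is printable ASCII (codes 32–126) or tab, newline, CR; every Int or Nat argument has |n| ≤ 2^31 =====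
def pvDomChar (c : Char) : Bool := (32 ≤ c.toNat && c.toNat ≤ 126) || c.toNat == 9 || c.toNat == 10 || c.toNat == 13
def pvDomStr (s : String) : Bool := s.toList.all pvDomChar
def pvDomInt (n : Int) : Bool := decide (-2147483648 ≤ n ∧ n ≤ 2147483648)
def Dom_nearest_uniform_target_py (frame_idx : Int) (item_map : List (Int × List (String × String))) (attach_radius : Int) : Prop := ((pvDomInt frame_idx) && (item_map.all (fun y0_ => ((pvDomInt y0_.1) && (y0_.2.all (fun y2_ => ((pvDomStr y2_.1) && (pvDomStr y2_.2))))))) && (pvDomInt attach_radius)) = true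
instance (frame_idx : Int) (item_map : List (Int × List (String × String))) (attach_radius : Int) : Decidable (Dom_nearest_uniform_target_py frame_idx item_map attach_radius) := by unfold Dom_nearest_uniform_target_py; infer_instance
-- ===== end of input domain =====

-- B replaces A's sort-then-min-distance-scan by a two-sided neighbor search: one pass
-- computes the greatest uniform key ≤ frame_idx and the least uniform key > frame_idx,
-- then a final comparison picks between these two candidates (no sort).

-- ===== PORT A =====
-- literal transliteration of A: sort the dict keys, scan in sorted order keeping (best, best_dist),
-- update on strictly smaller distance; str(item.get("source_type")) is "None" when the key is absent
def nearest_uniform_target_py (frame_idx : Int) (item_map : List (Int × List (String × String))) (attach_radius : Int) : Option Int :=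
  let d := PySem.Dict.ofList item_map
  let st := (PySem.List.sorted d.keys (fun x => x) false).foldl
    (fun (st : Option Int × Option Int) existing_idx =>
      if (match (PySem.Dict.ofList (d.getD existing_idx [])).get? "source_type" with
          | some s => s
          | none => "None") ≠ "uniform" then st
      else
        if |frame_idx - existing_idx| > attach_radius then st
        else if st.1 = none ∨ |frame_idx - existing_idx| < st.2.getD 0 then (some existing_idx, some |frame_idx - existing_idx|)
        else st)
    ((none : Option Int), (none : Option Int))
  st.1

-- ===== PORT B =====
-- literal transliteration of B: one pass over item_map.items() tracking (left, right) =
-- (max uniform key ≤ frame_idx, min uniform key > frame_idx), then the final two-candidate choice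
def nearest_uniform_target_py_alt (frame_idx : Int) (item_map : List (Int × List (String × String))) (attach_radius : Int) : Option Int :=
  let st := (PySem.Dict.ofList item_map).items.foldl
    (fun (st : Option Int × Option Int) kv =>
      if (match (PySem.Dict.ofList kv.2).get? "source_type" with
          | some s => s
          | none => "None") ≠ "uniform" then st
      else
        if kv.1 ≤ frame_idx then
          if st.1 = none ∨ st.1.getD 0 < kv.1 then (some kv.1, st.2) else st
        else
          if st.2 = none ∨ kv.1 < st.2.getD 0 then (st.1, some kv.1) else st)
    ((none : Option Int), (none : Option Int))
  let ld := st.1.map (fun a => frame_idx - a)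
  let rd := st.2.map (fun b => b - frame_idx)
  if ld ≠ none ∧ ld.getD 0 ≤ attach_radius ∧ (rd = none ∨ ld.getD 0 ≤ rd.getD 0 ∨ rd.getD 0 > attach_radius) then st.1
  else if rd ≠ none ∧ rd.getD 0 ≤ attach_radius then st.2
  else none

-- ===== PRECONDITION & SPEC =====
def Spec_nearest_uniform_target_py (frame_idx : Int) (item_map : List (Int × List (String × String))) (attach_radius : Int) (out : Option Int) : Prop := out = nearest_uniform_target_py_alt frame_idx item_map attach_radius
instance (frame_idx : Int) (item_map : List (Int × List (String × String))) (attach_radius : Int) (out : Option Int) : Decidable (Spec_nearest_uniform_target_py frame_idx item_map attach_radius out) := by unfold Spec_nearest_uniform_target_py; infer_instance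

-- ===== CLAIM (what is proved, stated in full; the proofs are below) =====
def Claim_equal_nearest_uniform_target_py : Prop := ∀ (frame_idx : Int) (item_map : List (Int × List (String × String))) (attach_radius : Int), Dom_nearest_uniform_target_py frame_idx item_map attach_radius → Spec_nearest_uniform_target_py frame_idx item_map attach_radius (nearest_uniform_target_py frame_idx item_map attach_radius)

-- ===== LEMMAS AND PROOFS =====

-- A's loop body, as a function of the key (the dict is fixed)
def pvG (frame_idx attach_radius : Int) (d : PySem.Dict Int (List (String × String))) (st : Option Int × Option Int) (existing_idx : Int) : Option Int × Option Int :=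
  if (match (PySem.Dict.ofList (d.getD existing_idx [])).get? "source_type" with
      | some s => s
      | none => "None") ≠ "uniform" then st
  else
    if |frame_idx - existing_idx| > attach_radius then st
    else if st.1 = none ∨ |frame_idx - existing_idx| < st.2.getD 0 then (some existing_idx, some |frame_idx - existing_idx|)
    else st

-- intermediate body (proof device): lexicographic minimum of (distance, index)
def pvg (frame_idx attach_radius : Int) (d : PySem.Dict Int (List (String × String))) (pm : Option (Int × Int)) (k : Int) : Option (Int × Int) :=
  if (match (PySem.Dict.ofList (d.getD k [])).get? "source_type" with
      | some s => s
      | none => "None") ≠ "uniform" then pm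
  else
    if |frame_idx - k| ≤ attach_radius then
      match pm with
      | none => some (|frame_idx - k|, k)
      | some b => if |frame_idx - k| < b.1 ∨ (|frame_idx - k| = b.1 ∧ k < b.2) then some (|frame_idx - k|, k) else some b
    else pm

-- B's loop body, specialised to the key (the dict is fixed)
def pvH (frame_idx : Int) (d : PySem.Dict Int (List (String × String))) (st : Option Int × Option Int) (k : Int) : Option Int × Option Int :=
  if (match (PySem.Dict.ofList (d.getD k [])).get? "source_type" with
      | some s => s
      | none => "None") ≠ "uniform" then st
  else
    if k ≤ frame_idx then
      if st.1 = none ∨ st.1.getD 0 < k then (some k, st.2) else st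
    else
      if st.2 = none ∨ k < st.2.getD 0 then (st.1, some k) else st

-- the lex-min pair determined by a (left, right) neighbor state
def pvPhi (frame_idx attach_radius : Int) (st : Option Int × Option Int) : Option (Int × Int) :=
  match st.1, st.2 with
  | some a, some b =>
      if frame_idx - a ≤ attach_radius ∧ (frame_idx - a ≤ b - frame_idx ∨ b - frame_idx > attach_radius) then some (frame_idx - a, a)
      else if b - frame_idx ≤ attach_radius then some (b - frame_idx, b) else none
  | some a, none => if frame_idx - a ≤ attach_radius then some (frame_idx - a, a) else none
  | none, some b => if b - frame_idx ≤ attach_radius then some (b - frame_idx, b) else none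
  | none, none => none

-- A's pair state as a view of the lex-min pair
def pvStOf (pm : Option (Int × Int)) : Option Int × Option Int :=
  match pm with
  | none => (none, none)
  | some b => (some b.2, some b.1)

theorem pvg_rightComm (fi r : Int) (d : PySem.Dict Int (List (String × String)))
    (pm : Option (Int × Int)) (a c : Int) :
    pvg fi r d (pvg fi r d pm a) c = pvg fi r d (pvg fi r d pm c) a := by
  unfold pvg
  rcases pm with _ | ⟨b1, b2⟩ <;> split_ifs <;> dsimp only
  all_goals repeat' (first | (split_ifs <;> try dsimp only) | dsimp only)
  all_goals
    first
    | rfl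
    | (exfalso; omega)
    | (simp only [Option.some.injEq, Prod.mk.injEq]; omega)

theorem pv_foldl_perm {α β : Type} (f : β → α → β)
    (h : ∀ b a c, f (f b a) c = f (f b c) a)
    {l₁ l₂ : List α} (p : l₁.Perm l₂) : ∀ b, l₁.foldl f b = l₂.foldl f b := by
  induction p with
  | nil => intro b; rfl
  | cons x _ ih => intro b; simp [List.foldl, ih]
  | swap x y l => intro b; simp [List.foldl, h]
  | trans _ _ ih₁ ih₂ => intro b; rw [ih₁, ih₂]

-- on a strictly increasing key list, A's scan is the pvStOf-view of the lex-min fold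
theorem pvAB (fi r : Int) (d : PySem.Dict Int (List (String × String))) :
    ∀ (l : List Int), l.Pairwise (· < ·) →
      ∀ (pm : Option (Int × Int)), (∀ b, pm = some b → ∀ k ∈ l, b.2 < k) →
        l.foldl (pvG fi r d) (pvStOf pm) = pvStOf (l.foldl (pvg fi r d) pm) := by
  intro l
  induction l with
  | nil => intro _ pm _; rfl
  | cons k t ih =>
    intro hp pm hk
    have hpt : t.Pairwise (· < ·) := (List.pairwise_cons.mp hp).2
    have hkt : ∀ x ∈ t, k < x := (List.pairwise_cons.mp hp).1
    have hstep : pvG fi r d (pvStOf pm) k = pvStOf (pvg fi r d pm k) := by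
      unfold pvG pvg
      rcases pm with _ | ⟨b1, b2⟩
      · dsimp only [pvStOf]
        repeat' (first | (split_ifs <;> try dsimp only [pvStOf]) | dsimp only [pvStOf])
        all_goals
          first
          | rfl
          | (exfalso; omega)
          | (exfalso; simp_all)
          | (simp_all; omega)
          | simp_all
      · have hb : b2 < k := hk (b1, b2) rfl k (List.mem_cons_self ..)
        dsimp only [pvStOf]
        repeat' (first | (split_ifs <;> try dsimp only [pvStOf]) | dsimp only [pvStOf])
        all_goals
          first
          | rfl
          | (exfalso; omega)
          | (exfalso; simp_all; omega)
          | (simp only [Prod.mk.injEq, Option.some.injEq]; constructor <;> omega)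
          | (exfalso; simp_all; omega)
          | (simp_all; omega)
          | simp_all
    have hk' : ∀ b, pvg fi r d pm k = some b → ∀ x ∈ t, b.2 < x := by
      intro b hb x hx
      unfold pvg at hb
      rcases pm with _ | ⟨c1, c2⟩ <;>
        (repeat' (first | split_ifs at hb | dsimp only at hb)) <;>
        first
        | (injection hb with h; subst h;
           first
           | exact hkt x hx
           | exact hk _ rfl x (List.mem_cons_of_mem _ hx))
        | (exfalso; exact Option.noConfusion hb)
    simp only [List.foldl_cons, hstep]
    exact ih hpt (pvg fi r d pm k) hk'

-- one step: the lex-min fold tracks pvPhi of B's (left, right) state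
theorem pvStep (fi r : Int) (d : PySem.Dict Int (List (String × String)))
    (st : Option Int × Option Int) (k : Int)
    (ha : ∀ a, st.1 = some a → a ≤ fi) (hb : ∀ b, st.2 = some b → fi < b) :
    pvg fi r d (pvPhi fi r st) k = pvPhi fi r (pvH fi d st k) := by
  obtain ⟨a?, b?⟩ := st
  simp only at ha hb
  unfold pvg pvH
  by_cases hkf : k ≤ fi
  · have habs : |fi - k| = fi - k := abs_of_nonneg (by omega)
    rcases a? with _ | a <;> rcases b? with _ | b <;>
      [skip; (have := hb b rfl); (have := ha a rfl); (have := ha a rfl; have := hb b rfl)] <;>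
      simp only [pvPhi, habs] <;>
      (repeat' (first | (split_ifs <;> try dsimp only) | dsimp only)) <;>
      first
      | rfl
      | (exfalso; omega)
      | (simp only [Option.some.injEq, Prod.mk.injEq]; omega)
      | (simp_all; omega)
      | simp_all
  · have habs : |fi - k| = k - fi := by rw [abs_sub_comm]; exact abs_of_nonneg (by omega)
    rcases a? with _ | a <;> rcases b? with _ | b <;>
      [skip; (have := hb b rfl); (have := ha a rfl); (have := ha a rfl; have := hb b rfl)] <;>
      simp only [pvPhi, habs] <;>
      (repeat' (first | (split_ifs <;> try dsimp only) | dsimp only)) <;>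
      first
      | rfl
      | (exfalso; omega)
      | (simp only [Option.some.injEq, Prod.mk.injEq]; omega)
      | (simp_all; omega)
      | simp_all

theorem pvH_inv (fi : Int) (d : PySem.Dict Int (List (String × String)))
    (st : Option Int × Option Int) (k : Int)
    (ha : ∀ a, st.1 = some a → a ≤ fi) (hb : ∀ b, st.2 = some b → fi < b) :
    (∀ a, (pvH fi d st k).1 = some a → a ≤ fi) ∧ (∀ b, (pvH fi d st k).2 = some b → fi < b) := by
  unfold pvH
  rcases st with ⟨a?, b?⟩
  split_ifs <;>
    first
    | exact ⟨ha, hb⟩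
    | (constructor <;> intro x hx <;> simp_all <;> omega)

-- the lex-min fold equals pvPhi of B's fold, for any key order
theorem pvBA (fi r : Int) (d : PySem.Dict Int (List (String × String))) :
    ∀ (l : List Int) (st : Option Int × Option Int),
      (∀ a, st.1 = some a → a ≤ fi) → (∀ b, st.2 = some b → fi < b) →
      l.foldl (pvg fi r d) (pvPhi fi r st) = pvPhi fi r (l.foldl (pvH fi d) st) := by
  intro l
  induction l with
  | nil => intro st _ _; rfl
  | cons k t ih =>
    intro st ha hb
    obtain ⟨ha', hb'⟩ := pvH_inv fi d st k ha hb
    simp only [List.foldl_cons, pvStep fi r d st k ha hb]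
    exact ih (pvH fi d st k) ha' hb'

theorem pvStOf_fst (pm : Option (Int × Int)) : (pvStOf pm).1 = pm.map (fun b => b.2) := by
  cases pm <;> rfl

-- B's final two-candidate choice equals the second component of pvPhi
theorem pvSel (fi r : Int) (st : Option Int × Option Int) :
    (let ld := st.1.map (fun a => fi - a)
     let rd := st.2.map (fun b => b - fi)
     if ld ≠ none ∧ ld.getD 0 ≤ r ∧ (rd = none ∨ ld.getD 0 ≤ rd.getD 0 ∨ rd.getD 0 > r) then st.1
     else if rd ≠ none ∧ rd.getD 0 ≤ r then st.2
     else none) = (pvPhi fi r st).map (fun b => b.2) := by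
  rcases st with ⟨a?, b?⟩
  rcases a? with _ | a <;> rcases b? with _ | b <;>
    simp only [pvPhi, Option.map] <;>
    (repeat' (first | (split_ifs <;> try dsimp only) | dsimp only)) <;>
    first
    | rfl
    | (exfalso; omega)
    | (simp only [Option.some.injEq]; omega)
    | (simp_all; omega)
    | simp_all

theorem pvA_eq (fi : Int) (m : List (Int × List (String × String))) (r : Int) :
    nearest_uniform_target_py fi m r =
      ((PySem.List.sorted (PySem.Dict.ofList m).keys (fun x => x) false).foldl
        (pvG fi r (PySem.Dict.ofList m)) (pvStOf none)).1 := rfl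

theorem pvB_eq (fi : Int) (m : List (Int × List (String × String))) (r : Int) :
    nearest_uniform_target_py_alt fi m r =
      (pvPhi fi r ((PySem.Dict.ofList m).keys.foldl (pvH fi (PySem.Dict.ofList m)) (none, none))).map (fun b => b.2) := by
  unfold nearest_uniform_target_py_alt
  rw [PySem.Dict.items_eq_map_keys (PySem.Dict.ofList m) (PySem.Dict.nodup_keys_ofList m) [],
    List.foldl_map]
  exact pvSel fi r _

theorem pv_sorted_keys_lt (m : List (Int × List (String × String))) :
    (PySem.List.sorted (PySem.Dict.ofList m).keys (fun x => x) false).Pairwise (· < ·) := by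
  have hle := PySem.List.sorted_pairwise (PySem.Dict.ofList m).keys (fun x => x)
  have hnd : (PySem.List.sorted (PySem.Dict.ofList m).keys (fun x => x) false).Nodup :=
    (PySem.List.sorted_perm (PySem.Dict.ofList m).keys (fun x => x) false).nodup_iff.mpr
      (PySem.Dict.nodup_keys_ofList m)
  exact (hle.and hnd).imp (fun h => lt_of_le_of_ne h.1 h.2)

-- ===== VERDICT (by name: the statement is the Claim_ definition above) =====
theorem nearest_uniform_target_py_spec : Claim_equal_nearest_uniform_target_py := by
  intro fi m r _
  unfold Spec_nearest_uniform_target_py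
  have hBA := pvBA fi r (PySem.Dict.ofList m) (PySem.Dict.ofList m).keys (none, none)
    (by intro a h; cases h) (by intro b h; cases h)
  rw [show pvPhi fi r ((none : Option Int), (none : Option Int)) = none from rfl] at hBA
  rw [pvA_eq, pvB_eq,
    pvAB fi r (PySem.Dict.ofList m) _ (pv_sorted_keys_lt m) none (by intro b h; cases h),
    pvStOf_fst,
    pv_foldl_perm (pvg fi r (PySem.Dict.ofList m)) (pvg_rightComm fi r (PySem.Dict.ofList m))
      (PySem.List.sorted_perm (PySem.Dict.ofList m).keys (fun x => x) false) none,
    hBA]
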